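-- pv_equiv track=rewrite | github.com/Sandmann476/ROSALIND | code/overlap_graph.py | overlap_graph
-- ===== SOURCE A (Python) =====
-- def overlap_graph(fasta, k=3):
--     edges = []
--     labels = list(fasta.keys())
--     for a in labels:
--         for b in labels:
--             if a != b and fasta[a].endswith(fasta[b][:k]):
--                 edges.append((a, b))
--     return edges
-- ===== SOURCE B (Python) =====
-- def overlap_graph(fasta, k=3):
--     labels = list(fasta.keys())
--     # index each label by its length-k prefix (one hash bucket per prefix)
--     index = {}
--     for i, b in enumerate(labels):
--         index.setdefault(fasta[b][:k], []).append((i, b))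
--     lengths = sorted({len(p) for p in index})
--     edges = []
--     for a in labels:
--         s = fasta[a]
--         cands = []
--         for L in lengths:
--             if L <= len(s):
--                 for ib in index.get(s[len(s) - L:], []):
--                     if ib[1] != a:
--                         cands.append(ib)
--         cands.sort(key=lambda t: t[0])
--         for _, b in cands:
--             edges.append((a, b))
--     return edges
-- ===== Notes on version B (the rewrite author's own statement) =====
-- stated objective: faster
-- what changed: Instead of the all-pairs double loop testing endswith for every (a,b), B builds a hash index from each length-k prefix to its labels once, then for each label looks up its suffixes of the few distinct prefix lengths and merges the hits by original label order.
import Mathlib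
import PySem

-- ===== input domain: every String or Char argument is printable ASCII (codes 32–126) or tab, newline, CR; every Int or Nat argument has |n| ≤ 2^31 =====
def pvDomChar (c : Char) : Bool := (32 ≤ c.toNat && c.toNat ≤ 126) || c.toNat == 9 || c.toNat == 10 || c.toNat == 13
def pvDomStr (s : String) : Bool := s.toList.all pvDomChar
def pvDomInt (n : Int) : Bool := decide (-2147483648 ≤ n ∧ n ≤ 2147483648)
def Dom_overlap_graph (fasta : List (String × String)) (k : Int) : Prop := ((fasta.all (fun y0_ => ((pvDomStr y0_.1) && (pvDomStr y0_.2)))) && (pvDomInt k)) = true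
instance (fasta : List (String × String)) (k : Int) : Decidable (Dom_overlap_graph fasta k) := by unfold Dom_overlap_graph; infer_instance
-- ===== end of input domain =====

-- B replaces A's all-pairs endswith scan by a hash index from each length-k prefix to its labels,
-- looked up once per label and distinct prefix length (objective: faster; same return value).

-- ===== PORT A =====
def overlap_graph (fasta : List (String × String)) (k : Int) : List (String × String) :=
  let d := PySem.Dict.ofList fasta
  let labels := d.keys
  labels.foldl (fun edges a =>
    labels.foldl (fun edges b =>
      if a ≠ b ∧ PySem.Str.endswith (d.getD a "") (PySem.Str.slice (d.getD b "") none (some k)) = true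
      then edges ++ [(a, b)] else edges) edges) []

-- ===== PORT B =====
-- helpers mirror Source B's phases: build the prefix index, collect the distinct prefix lengths,
-- then per label gather and sort that label's candidate matches.
def ogIndex (d : PySem.Dict String String) (k : Int) (labels : List String) :
    PySem.Dict String (List (Int × String)) :=
  (PySem.List.enumerate labels 0).foldl
    (fun idx ib => idx.modify (PySem.Str.slice (d.getD ib.2 "") none (some k)) [] (fun l => l ++ [ib]))
    PySem.Dict.empty

def ogLengths (index : PySem.Dict String (List (Int × String))) : List Int :=
  PySem.List.sorted (PySem.Set.ofList (index.keys.map (fun p => (PySem.Str.len p : Int)))) (fun x => x) false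

def ogRow (index : PySem.Dict String (List (Int × String))) (lengths : List Int)
    (s : String) (a : String) : List (Int × String) :=
  let cands := lengths.foldl (fun cands L =>
    if L ≤ PySem.Str.len s then
      (index.getD (PySem.Str.slice s (some (PySem.Str.len s - L)) none) []).foldl
        (fun cs ib => if ib.2 ≠ a then cs ++ [ib] else cs) cands
    else cands) []
  PySem.List.sorted cands (fun ib => ib.1) false

def overlap_graph_alt (fasta : List (String × String)) (k : Int) : List (String × String) :=
  let d := PySem.Dict.ofList fasta
  let labels := d.keys
  let index := ogIndex d k labels
  let lengths := ogLengths index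
  labels.foldl (fun edges a =>
    edges ++ (ogRow index lengths (d.getD a "") a).map (fun ib => (a, ib.2))) []

-- ===== PRECONDITION & SPEC =====
def Spec_overlap_graph (fasta : List (String × String)) (k : Int) (out : List (String × String)) : Prop := out = overlap_graph_alt fasta k
instance (fasta : List (String × String)) (k : Int) (out : List (String × String)) : Decidable (Spec_overlap_graph fasta k out) := by unfold Spec_overlap_graph; infer_instance

-- ===== CLAIM (what is proved, stated in full; the proofs are below) =====
def Claim_equal_overlap_graph : Prop := ∀ (fasta : List (String × String)) (k : Int), Dom_overlap_graph fasta k → Spec_overlap_graph fasta k (overlap_graph fasta k)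

-- ===== LEMMAS AND PROOFS =====

-- bucket contents of the grouping fold
theorem ogIndex_getD_aux (d : PySem.Dict String String) (k : Int) :
  ∀ (xs : List (Int × String)) (d0 : PySem.Dict String (List (Int × String))) (p : String),
    (xs.foldl (fun idx ib => idx.modify (PySem.Str.slice (d.getD ib.2 "") none (some k)) [] (fun l => l ++ [ib])) d0).getD p []
      = d0.getD p [] ++ xs.filter (fun ib => PySem.Str.slice (d.getD ib.2 "") none (some k) == p)
  | [], d0, p => by simp
  | x :: xs, d0, p => by
      rw [List.foldl_cons, ogIndex_getD_aux d k xs, PySem.Dict.getD_modify, List.filter_cons]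
      by_cases h : p = PySem.Str.slice (d.getD x.2 "") none (some k)
      · simp [h, List.append_assoc]
      · simp [h, Ne.symm h]

theorem ogIndex_getD (d : PySem.Dict String String) (k : Int) (labels : List String) (p : String) :
    (ogIndex d k labels).getD p []
      = (PySem.List.enumerate labels 0).filter (fun ib => PySem.Str.slice (d.getD ib.2 "") none (some k) == p) := by
  rw [ogIndex, ogIndex_getD_aux, PySem.Dict.getD_empty, List.nil_append]

theorem ogIndex_contains_aux (d : PySem.Dict String String) (k : Int) :
  ∀ (xs : List (Int × String)) (d0 : PySem.Dict String (List (Int × String))) (p : String),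
    (xs.foldl (fun idx ib => idx.modify (PySem.Str.slice (d.getD ib.2 "") none (some k)) [] (fun l => l ++ [ib])) d0).contains p
      = (d0.contains p || xs.any (fun ib => PySem.Str.slice (d.getD ib.2 "") none (some k) == p))
  | [], d0, p => by simp
  | x :: xs, d0, p => by
      rw [List.foldl_cons, ogIndex_contains_aux d k xs, PySem.Dict.contains_modify, List.any_cons]
      rw [BEq.comm, Bool.or_left_comm, Bool.or_assoc]

theorem mem_keys_ogIndex (d : PySem.Dict String String) (k : Int) (labels : List String) (p : String) :
    p ∈ (ogIndex d k labels).keys ↔ ∃ b ∈ labels, PySem.Str.slice (d.getD b "") none (some k) = p := by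
  rw [← PySem.Dict.contains_iff_mem_keys, ogIndex, ogIndex_contains_aux]
  simp only [PySem.Dict.contains_empty, Bool.false_or, List.any_eq_true, beq_iff_eq]
  constructor
  · rintro ⟨ib, hib, hp⟩
    rcases (PySem.List.mem_enumerate_iff _ _ _).mp hib with ⟨j, hj, rfl⟩
    exact ⟨labels[j], List.getElem_mem hj, hp⟩
  · rintro ⟨b, hb, hp⟩
    rcases List.getElem_of_mem hb with ⟨j, hj, rfl⟩
    exact ⟨((0 : Int) + j, labels[j]), (PySem.List.mem_enumerate_iff _ _ _).mpr ⟨j, hj, rfl⟩, hp⟩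

-- split a filter into two disjoint filters, up to permutation
theorem filter_or_perm {α : Type} (P Q R : α → Bool) :
  ∀ (xs : List α), (∀ x ∈ xs, P x = (Q x || R x)) → (∀ x ∈ xs, ¬(Q x = true ∧ R x = true)) →
    (xs.filter P).Perm (xs.filter Q ++ xs.filter R)
  | [], _, _ => by simp
  | x :: xs, hor, hdis => by
      have ih := filter_or_perm P Q R xs (fun y hy => hor y (List.mem_cons_of_mem x hy))
        (fun y hy => hdis y (List.mem_cons_of_mem x hy))
      have hx := hor x (List.mem_cons_self)
      cases hq : Q x <;> cases hr : R x
      · simpa [List.filter_cons, hx, hq, hr] using ih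
      · simpa [List.filter_cons, hx, hq, hr] using (ih.cons x).trans List.perm_middle.symm
      · simpa [List.filter_cons, hx, hq, hr] using ih.cons x
      · exact absurd ⟨hq, hr⟩ (hdis x List.mem_cons_self)

-- a flatMap of per-condition filters over pairwise-incompatible conditions is the combined filter
theorem flatMap_filter_perm {α : Type} (q : Int → α → Bool) :
  ∀ (ls : List Int) (P : α → Bool) (xs : List α), ls.Nodup →
    (∀ x ∈ xs, (P x = true ↔ ∃ L ∈ ls, q L x = true)) →
    (∀ x ∈ xs, ∀ L1 ∈ ls, ∀ L2 ∈ ls, q L1 x = true → q L2 x = true → L1 = L2) →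
    (ls.flatMap (fun L => xs.filter (q L))).Perm (xs.filter P)
  | [], P, xs, _, hiff, _ => by
      have : xs.filter P = [] := List.filter_eq_nil_iff.mpr (fun x hx hP => by
        rcases (hiff x hx).mp hP with ⟨L, hL, _⟩; exact absurd hL (List.not_mem_nil))
      simp [this]
  | L :: ls, P, xs, hnd, hiff, huniq => by
      have hLnotin : L ∉ ls := (List.nodup_cons.mp hnd).1
      have ih := flatMap_filter_perm q ls (fun x => P x && !q L x) xs (List.nodup_cons.mp hnd).2
        (fun x hx => by
          constructor
          · intro h
            rcases (by simpa using h : P x = true ∧ q L x = false) with ⟨hP, hnq⟩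
            rcases (hiff x hx).mp hP with ⟨L', hL', hq'⟩
            rcases List.mem_cons.mp hL' with rfl | hL'ls
            · exact absurd hq' (by simp [hnq])
            · exact ⟨L', hL'ls, hq'⟩
          · rintro ⟨L', hL', hq'⟩
            have hP : P x = true := (hiff x hx).mpr ⟨L', List.mem_cons_of_mem L hL', hq'⟩
            have hnq : q L x ≠ true := fun hq => by
              have := huniq x hx L List.mem_cons_self L' (List.mem_cons_of_mem L hL') hq hq'
              exact hLnotin (this ▸ hL')
            simp [hP, hnq])
        (fun x hx L1 h1 L2 h2 => huniq x hx L1 (List.mem_cons_of_mem L h1) L2 (List.mem_cons_of_mem L h2))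
      have hsplit : (xs.filter P).Perm (xs.filter (q L) ++ xs.filter (fun x => P x && !q L x)) := by
        apply filter_or_perm
        · intro x hx
          cases hq : q L x
          · simp
          · simp [(hiff x hx).mpr ⟨L, List.mem_cons_self, hq⟩]
        · intro x hx ⟨h1, h2⟩
          rcases (by simpa using h2 : P x = true ∧ q L x = false) with ⟨_, hnq⟩
          simp [h1] at hnq
      rw [List.flatMap_cons]
      exact ((ih.append_left (xs.filter (q L))).trans hsplit.symm)

theorem sfx_toList (s : String) (L : Int) (h0 : 0 ≤ L) (hle : L ≤ PySem.Str.len s) :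
    (PySem.Str.slice s (some (PySem.Str.len s - L)) none).toList
      = s.toList.drop (s.toList.length - L.toNat) := by
  have hnn : (0:Int) ≤ PySem.Str.len s - L := by rw [PySem.Str.len_eq]; rw [PySem.Str.len_eq] at hle; omega
  rw [PySem.Str.toList_slice, PySem.Chars.slice_eq_listSlice,
    PySem.List.slice_from s.toList hnn]
  congr 1
  rw [PySem.Str.len_eq] at hle ⊢
  omega

theorem sfx_length (s : String) (L : Int) (h0 : 0 ≤ L) (hle : L ≤ PySem.Str.len s) :
    ((PySem.Str.slice s (some (PySem.Str.len s - L)) none).toList).length = L.toNat := by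
  rw [sfx_toList s L h0 hle, List.length_drop]
  rw [PySem.Str.len_eq] at hle
  omega

theorem mem_ogLengths (index : PySem.Dict String (List (Int × String))) (L : Int) :
    L ∈ ogLengths index ↔ ∃ p ∈ index.keys, PySem.Str.len p = L := by
  rw [ogLengths, PySem.List.mem_sorted, PySem.Set.mem_ofList]
  simp

theorem nonneg_of_mem_ogLengths (index : PySem.Dict String (List (Int × String))) (L : Int)
    (h : L ∈ ogLengths index) : 0 ≤ L := by
  rcases (mem_ogLengths index L).mp h with ⟨p, _, rfl⟩
  rw [PySem.Str.len_eq]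
  positivity

theorem nodup_ogLengths (index : PySem.Dict String (List (Int × String))) :
    (ogLengths index).Nodup :=
  (PySem.List.sorted_perm _ _ _).symm.nodup (PySem.Set.nodup_ofList _)

theorem endswith_iff_suffix (s p : String) :
    PySem.Str.endswith s p = true ↔ p.toList <:+ s.toList := by
  rw [PySem.Str.endswith_eq, PySem.Chars.endswith_iff]

-- filtered enumerate, re-indexed: a filter that ignores the index projects back to the labels
theorem enum_filter_map (r : String → Bool) (a : String) :
  ∀ (labels : List String) (s0 : Int),
    ((PySem.List.enumerate labels s0).filter (fun ib => r ib.2)).map (fun ib => (a, ib.2))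
      = (labels.filter r).map (fun b => (a, b))
  | [], _ => by simp [PySem.List.enumerate_nil]
  | x :: labels, s0 => by
      rw [PySem.List.enumerate_cons, List.filter_cons, List.filter_cons]
      cases hr : r x <;> simp [enum_filter_map r a labels (s0 + 1)]

def ogP (d : PySem.Dict String String) (k : Int) (a : String) : Int × String → Bool :=
  fun ib => decide (ib.2 ≠ a) && PySem.Str.endswith (d.getD a "") (PySem.Str.slice (d.getD ib.2 "") none (some k))

def ogQ (d : PySem.Dict String String) (k : Int) (a : String) (L : Int) : Int × String → Bool :=
  fun ib => decide (L ≤ PySem.Str.len (d.getD a "")) &&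
    (PySem.Str.slice (d.getD ib.2 "") none (some k) ==
      PySem.Str.slice (d.getD a "") (some (PySem.Str.len (d.getD a "") - L)) none) &&
    decide (ib.2 ≠ a)


theorem ogRow_eq (d : PySem.Dict String String) (k : Int) (labels : List String) (a : String) :
    ogRow (ogIndex d k labels) (ogLengths (ogIndex d k labels)) (d.getD a "") a
      = (PySem.List.enumerate labels 0).filter (ogP d k a) := by
  have hmem : ∀ x ∈ PySem.List.enumerate labels 0, x.2 ∈ labels := by
    intro x hx
    rcases (PySem.List.mem_enumerate_iff _ _ _).mp hx with ⟨j, hj, rfl⟩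
    exact List.getElem_mem hj
  have hiff : ∀ x ∈ PySem.List.enumerate labels 0,
      (ogP d k a x = true ↔ ∃ L ∈ ogLengths (ogIndex d k labels), ogQ d k a L x = true) := by
    intro x hx
    constructor
    · intro h
      rcases (by simpa [ogP] using h :
        x.2 ≠ a ∧ PySem.Str.endswith (d.getD a "") (PySem.Str.slice (d.getD x.2 "") none (some k)) = true)
        with ⟨hne, hew⟩
      have hsuf := (endswith_iff_suffix _ _).mp hew
      have hlenle := hsuf.length_le
      have h0 : 0 ≤ PySem.Str.len (PySem.Str.slice (d.getD x.2 "") none (some k)) := by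
        rw [PySem.Str.len_eq]; positivity
      have h1 : PySem.Str.len (PySem.Str.slice (d.getD x.2 "") none (some k)) ≤ PySem.Str.len (d.getD a "") := by
        rw [PySem.Str.len_eq, PySem.Str.len_eq]; exact_mod_cast hlenle
      refine ⟨PySem.Str.len (PySem.Str.slice (d.getD x.2 "") none (some k)), ?_, ?_⟩
      · exact (mem_ogLengths _ _).mpr ⟨_, (mem_keys_ogIndex d k labels _).mpr ⟨x.2, hmem x hx, rfl⟩, rfl⟩
      · have heq : PySem.Str.slice (d.getD x.2 "") none (some k)
            = PySem.Str.slice (d.getD a "")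
                (some (PySem.Str.len (d.getD a "") - PySem.Str.len (PySem.Str.slice (d.getD x.2 "") none (some k)))) none := by
          apply String.ext
          rw [sfx_toList _ _ h0 h1]
          have := List.suffix_iff_eq_drop.mp hsuf
          rw [PySem.Str.len_eq]
          simpa using this
        simp only [ogQ, Bool.and_eq_true, decide_eq_true_iff, beq_iff_eq]
        exact ⟨⟨h1, heq⟩, hne⟩
    · rintro ⟨L, hL, hq⟩
      rcases (by simpa [ogQ] using hq :
        (L ≤ PySem.Str.len (d.getD a "") ∧
          PySem.Str.slice (d.getD x.2 "") none (some k) =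
            PySem.Str.slice (d.getD a "") (some (PySem.Str.len (d.getD a "") - L)) none) ∧ x.2 ≠ a)
        with ⟨⟨hle, hbe⟩, hne⟩
      have h0 := nonneg_of_mem_ogLengths _ _ hL
      have hsuf : (PySem.Str.slice (d.getD x.2 "") none (some k)).toList <:+ (d.getD a "").toList := by
        rw [hbe, sfx_toList _ _ h0 hle]
        exact List.drop_suffix _ _
      simp only [ogP, Bool.and_eq_true, decide_eq_true_iff]
      exact ⟨hne, (endswith_iff_suffix _ _).mpr hsuf⟩
  have huniq : ∀ x ∈ PySem.List.enumerate labels 0,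
      ∀ L1 ∈ ogLengths (ogIndex d k labels), ∀ L2 ∈ ogLengths (ogIndex d k labels),
      ogQ d k a L1 x = true → ogQ d k a L2 x = true → L1 = L2 := by
    intro x _ L1 hL1 L2 hL2 hq1 hq2
    rcases (by simpa [ogQ] using hq1 :
      (L1 ≤ PySem.Str.len (d.getD a "") ∧
        PySem.Str.slice (d.getD x.2 "") none (some k) =
          PySem.Str.slice (d.getD a "") (some (PySem.Str.len (d.getD a "") - L1)) none) ∧ x.2 ≠ a)
      with ⟨⟨hle1, hbe1⟩, _⟩
    rcases (by simpa [ogQ] using hq2 :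
      (L2 ≤ PySem.Str.len (d.getD a "") ∧
        PySem.Str.slice (d.getD x.2 "") none (some k) =
          PySem.Str.slice (d.getD a "") (some (PySem.Str.len (d.getD a "") - L2)) none) ∧ x.2 ≠ a)
      with ⟨⟨hle2, hbe2⟩, _⟩
    have e1 : (PySem.Str.slice (d.getD x.2 "") none (some k)).toList.length = L1.toNat := by
      rw [hbe1]; exact sfx_length _ _ (nonneg_of_mem_ogLengths _ _ hL1) hle1
    have e2 : (PySem.Str.slice (d.getD x.2 "") none (some k)).toList.length = L2.toNat := by
      rw [hbe2]; exact sfx_length _ _ (nonneg_of_mem_ogLengths _ _ hL2) hle2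
    have := nonneg_of_mem_ogLengths _ _ hL1
    have := nonneg_of_mem_ogLengths _ _ hL2
    omega
  have h1 : (ogLengths (ogIndex d k labels)).foldl (fun cands L =>
      if L ≤ PySem.Str.len (d.getD a "") then
        ((ogIndex d k labels).getD (PySem.Str.slice (d.getD a "") (some (PySem.Str.len (d.getD a "") - L)) none) []).foldl
          (fun cs ib => if ib.2 ≠ a then cs ++ [ib] else cs) cands
      else cands) []
      = (ogLengths (ogIndex d k labels)).flatMap
          (fun L => (PySem.List.enumerate labels 0).filter (ogQ d k a L)) := by
    rw [PySem.List.foldl_congr_mem' _ _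
      (fun cands L => cands ++ (PySem.List.enumerate labels 0).filter (ogQ d k a L)) []
      ?_]
    · rw [PySem.List.foldl_append_eq_flatMap, List.nil_append]
    · intro L _ cands
      by_cases hle : L ≤ PySem.Str.len (d.getD a "")
      · rw [if_pos hle, PySem.List.foldl_append_ite_eq_filter, ogIndex_getD, List.filter_filter]
        congr 1
        apply List.filter_congr
        intro x _
        simp only [ogQ, hle, decide_true, Bool.true_and]
        rw [Bool.and_comm]
      · rw [if_neg hle]
        show cands = cands ++ (PySem.List.enumerate labels 0).filter (ogQ d k a L)
        have hnil : (PySem.List.enumerate labels 0).filter (ogQ d k a L) = [] := by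
          apply List.filter_eq_nil_iff.mpr
          intro x _ hq
          have hq' : (L ≤ PySem.Str.len (d.getD a "") ∧
              PySem.Str.slice (d.getD x.2 "") none (some k) =
                PySem.Str.slice (d.getD a "") (some (PySem.Str.len (d.getD a "") - L)) none) ∧ x.2 ≠ a := by
            simpa only [ogQ, Bool.and_eq_true, decide_eq_true_iff, beq_iff_eq] using hq
          exact hle hq'.1.1
        rw [hnil, List.append_nil]
  rw [ogRow, h1]
  exact PySem.List.sorted_eq_of_perm_of_pairwise_lt _ _ _
    (flatMap_filter_perm (ogQ d k a) _ (ogP d k a) _ (nodup_ogLengths _) hiff huniq).symm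
    ((PySem.List.pairwise_lt_enumerate labels 0).filter _)

theorem enum_filter_map_ogP (d : PySem.Dict String String) (k : Int) (a : String) :
  ∀ (labels : List String) (s0 : Int),
    ((PySem.List.enumerate labels s0).filter (ogP d k a)).map (fun ib => (a, ib.2))
      = (labels.filter (fun b => decide (b ≠ a) &&
          PySem.Str.endswith (d.getD a "") (PySem.Str.slice (d.getD b "") none (some k)))).map (fun b => (a, b))
  | [], _ => by simp [PySem.List.enumerate_nil]
  | x :: labels, s0 => by
      rw [PySem.List.enumerate_cons, List.filter_cons, List.filter_cons]
      cases hr : ogP d k a (s0, x)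
      · have hb : (decide (x ≠ a) && PySem.Str.endswith (d.getD a "") (PySem.Str.slice (d.getD x "") none (some k))) = false := hr
        simp only [hb, Bool.false_eq_true, if_false]
        exact enum_filter_map_ogP d k a labels (s0 + 1)
      · have hb : (decide (x ≠ a) && PySem.Str.endswith (d.getD a "") (PySem.Str.slice (d.getD x "") none (some k))) = true := hr
        simp only [hb, if_true, List.map_cons]
        rw [enum_filter_map_ogP d k a labels (s0 + 1)]

theorem overlap_graph_assembled (d : PySem.Dict String String) (k : Int) :
    d.keys.foldl (fun edges a => d.keys.foldl (fun edges b =>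
      if a ≠ b ∧ PySem.Str.endswith (d.getD a "") (PySem.Str.slice (d.getD b "") none (some k)) = true
      then edges ++ [(a, b)] else edges) edges) []
    = d.keys.foldl (fun edges a =>
        edges ++ (ogRow (ogIndex d k d.keys) (ogLengths (ogIndex d k d.keys)) (d.getD a "") a).map
          (fun ib => (a, ib.2))) [] := by
  have hpred : ∀ (a b : String) (e : Bool), (decide (a ≠ b ∧ e = true)) = (decide (b ≠ a) && e) := by
    intro a b e
    by_cases h : a = b <;> cases e <;> simp [h, eq_comm]
  rw [PySem.List.foldl_congr_mem' d.keys _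
    (fun edges a => edges ++ (d.keys.filter (fun b => decide (a ≠ b ∧
      PySem.Str.endswith (d.getD a "") (PySem.Str.slice (d.getD b "") none (some k)) = true))).map
      (fun b => (a, b))) []
    (fun a _ edges => PySem.List.foldl_append_ite _ _ _ _)]
  rw [PySem.List.foldl_append_eq_flatMap, PySem.List.foldl_append_eq_flatMap, List.nil_append, List.nil_append]
  congr 1
  funext a
  rw [ogRow_eq d k d.keys a, enum_filter_map_ogP d k a d.keys 0]
  congr 1
  apply List.filter_congr
  intro b _
  rw [hpred a b]

theorem overlap_graph_main (fasta : List (String × String)) (k : Int) :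
    overlap_graph fasta k = overlap_graph_alt fasta k := by
  rw [overlap_graph, overlap_graph_alt]
  exact overlap_graph_assembled (PySem.Dict.ofList fasta) k

-- ===== VERDICT (by name: the statement is the Claim_ definition above) =====
theorem overlap_graph_spec : Claim_equal_overlap_graph := by
  intro fasta k _
  unfold Spec_overlap_graph
  exact overlap_graph_main fasta k
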